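-- pv_equiv track=rewrite | github.com/m0h1nd4/wordpress-theme-detection | wpthemedetecror.py | is_wordpress_site
-- ===== SOURCE A (Python) =====
-- def is_wordpress_site(html_content: str) -> bool:
--     """
--     Determine if a site is running WordPress.
--
--     Args:
--         html_content: HTML content of the webpage.
--
--     Returns:
--         Boolean indicating if the site is a WordPress site.
--     """
--     wp_indicators = [
--         "wp-content",
--         "wp-includes",
--         'name="generator" content="WordPress',
--         "/wp-admin/",
--         "wp-json",
--     ]
--     return any(indicator in html_content for indicator in wp_indicators)
-- ===== SOURCE B (Python) =====
-- def is_wordpress_site(html_content: str) -> bool: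
--     """Single left-to-right scan: at each position check whether any
--     WordPress indicator starts there, instead of five separate 'in' scans."""
--     indicators = (
--         "wp-content",
--         "wp-includes",
--         'name="generator" content="WordPress',
--         "/wp-admin/",
--         "wp-json",
--     )
--     for i in range(len(html_content) + 1):
--         for ind in indicators:
--             if html_content.startswith(ind, i):
--                 return True
--     return False
-- ===== Notes on version B (the rewrite author's own statement) =====
-- stated objective: alternative
-- what changed: Replaces five independent substring searches (any(ind in html)) by one left-to-right scan over positions that tests at each position whether any indicator starts there.
import Mathlib
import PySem

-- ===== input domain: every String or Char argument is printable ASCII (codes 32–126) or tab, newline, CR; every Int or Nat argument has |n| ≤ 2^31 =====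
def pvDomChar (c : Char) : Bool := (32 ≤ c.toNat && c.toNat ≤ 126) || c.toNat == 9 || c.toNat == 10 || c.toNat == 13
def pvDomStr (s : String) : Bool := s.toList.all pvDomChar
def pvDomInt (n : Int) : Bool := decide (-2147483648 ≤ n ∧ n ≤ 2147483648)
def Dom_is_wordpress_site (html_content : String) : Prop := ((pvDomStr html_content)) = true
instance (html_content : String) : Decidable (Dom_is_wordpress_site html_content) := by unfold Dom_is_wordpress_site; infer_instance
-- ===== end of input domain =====

-- ===== PORT A =====
-- B changes the search strategy only (one positional scan instead of five 'in' scans); same return value.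
def is_wordpress_site (html_content : String) : Bool :=
  ["wp-content", "wp-includes", "name=\"generator\" content=\"WordPress",
   "/wp-admin/", "wp-json"].any (fun indicator => PySem.Str.isIn indicator html_content)

-- ===== PORT B =====
-- one pass over successive suffixes of the text (positions i = 0..len), testing each indicator as a prefix
def pvScan (inds : List (List Char)) : List Char → Bool
  | [] => inds.any (fun ind => ind.isPrefixOf ([] : List Char))
  | c :: rest =>
      inds.any (fun ind => ind.isPrefixOf (c :: rest)) || pvScan inds rest

def is_wordpress_site_alt (html_content : String) : Bool :=
  pvScan
    (["wp-content", "wp-includes", "name=\"generator\" content=\"WordPress",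
      "/wp-admin/", "wp-json"].map String.toList)
    html_content.toList

-- ===== PRECONDITION & SPEC =====
def Spec_is_wordpress_site (html_content : String) (out : Bool) : Prop := out = is_wordpress_site_alt html_content
instance (html_content : String) (out : Bool) : Decidable (Spec_is_wordpress_site html_content out) := by unfold Spec_is_wordpress_site; infer_instance

-- ===== CLAIM (what is proved, stated in full; the proofs are below) =====
def Claim_equal_is_wordpress_site : Prop := ∀ (html_content : String), Dom_is_wordpress_site html_content → Spec_is_wordpress_site html_content (is_wordpress_site html_content)

-- ===== LEMMAS AND PROOFS =====
theorem pvScan_eq_any_isIn (inds : List (List Char)) (l : List Char) :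
    pvScan inds l = inds.any (fun ind => PySem.Chars.isIn ind l) := by
  induction l with
  | nil =>
      rw [Bool.eq_iff_iff]
      simp [pvScan, List.any_eq_true, PySem.Chars.isIn_iff_infix]
  | cons c rest ih =>
      rw [pvScan, ih, Bool.eq_iff_iff]
      simp only [Bool.or_eq_true, List.any_eq_true, PySem.Chars.isIn_iff_infix,
        List.infix_cons_iff, List.isPrefixOf_iff_prefix]
      constructor
      · rintro (⟨x, hx, h⟩ | ⟨x, hx, h⟩) <;> exact ⟨x, hx, by tauto⟩
      · rintro ⟨x, hx, h | h⟩
        · exact Or.inl ⟨x, hx, h⟩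
        · exact Or.inr ⟨x, hx, h⟩

-- ===== VERDICT (by name: the statement is the Claim_ definition above) =====
theorem is_wordpress_site_spec : Claim_equal_is_wordpress_site := by
  intro html _
  unfold Spec_is_wordpress_site is_wordpress_site is_wordpress_site_alt
  rw [pvScan_eq_any_isIn]
  simp
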